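-- pv_equiv track=rewrite | github.com/martinlyra/advent-of-code-2023 | day_20.py | parse_schematic
-- ===== SOURCE A (Python) =====
-- def parse_schematic(string):
--     lines = [line for line in str.strip(string).split("\n") if len(line)]
--
--     nodes = {}
--     for line in lines:
--         parts = [str.strip(p) for p in str.split(line, "->")]
--         identifier = parts[0]
--         outputs = [str.strip(c) for c in str.split(parts[1], ",")]
--         node_type = identifier[0] if not str.isalpha(identifier[0]) else ""
--         identifier = identifier[1:] if not str.isalpha(identifier[0]) else identifier
--
--         nodes[identifier] = (node_type, [], outputs)
--
--     for i in list(nodes.keys()):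
--         for c in nodes[i][2]:
--             if c not in nodes:
--                 nodes[c] = ("out", [], [])
--             nodes[c][1].append(i)
--
--     return nodes
-- ===== SOURCE B (Python) =====
-- def parse_schematic(string):
--     lines = [line for line in string.strip().split("\n") if len(line)]
--
--     # declarations table: identifier -> (type, outputs), last definition wins
--     decls = {}
--     for line in lines:
--         parts = [p.strip() for p in line.split("->")]
--         outputs = [c.strip() for c in parts[1].split(",")]
--         ident = parts[0]
--         if ident[0].isalpha():
--             decls[ident] = ("", outputs)
--         else:
--             decls[ident[1:]] = (ident[0], outputs)
--
--     def inputs_of(t):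
--         # who feeds t: scan the declarations, one entry per matching output
--         return [i for i, (_, outs) in decls.items() for c in outs if c == t]
--
--     result = {i: (t, inputs_of(i), outs) for i, (t, outs) in decls.items()}
--     for _, (_, outs) in decls.items():
--         for c in outs:
--             if c not in result:
--                 result[c] = ("out", inputs_of(c), [])
--     return result
-- ===== Notes on version B (the rewrite author's own statement) =====
-- stated objective: alternative
-- what changed: A builds a reverse-edge index in a second pass that mutates the inputs lists stored inside the dict (creating placeholder nodes and appending to them); B never builds or mutates an inputs index at all: it computes each node's inputs on demand by a direct scan over the declarations table and assembles the result functionally.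
import Mathlib
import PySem

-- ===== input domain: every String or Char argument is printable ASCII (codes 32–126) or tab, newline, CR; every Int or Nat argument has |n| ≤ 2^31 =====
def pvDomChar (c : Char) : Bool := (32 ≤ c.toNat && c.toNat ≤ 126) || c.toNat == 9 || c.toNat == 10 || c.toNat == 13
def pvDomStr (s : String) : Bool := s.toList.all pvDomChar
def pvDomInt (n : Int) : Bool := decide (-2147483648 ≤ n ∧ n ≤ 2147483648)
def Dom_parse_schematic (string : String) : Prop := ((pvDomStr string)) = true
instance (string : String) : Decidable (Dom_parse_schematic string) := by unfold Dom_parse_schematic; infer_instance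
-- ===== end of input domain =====

-- B drops A's mutable reverse-edge index (the second pass that creates placeholders and
-- appends into the inputs lists stored in the dict) and instead computes each node's
-- inputs by a direct scan over the declarations table (objective: alternative algorithm).

-- ===== PORT A =====
-- the shared line shape: non-empty lines of the stripped input
def pvLines (string : String) : List String :=
  ((PySem.Str.split? (PySem.Str.strip string) "\n").getD []).filter
    (fun l => PySem.Str.len l != 0)

-- pass 1 of A: parse a line, (re)insert the node with an empty inputs list
def pvStepA1 (nodes : PySem.Dict String (String × List String × List String))
    (line : String) : PySem.Dict String (String × List String × List String) :=
  let parts := ((PySem.Str.split? line "->").getD []).map PySem.Str.strip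
  let identifier := parts.headD ""
  let outputs := ((PySem.Str.split? ((PySem.List.pyGet? parts 1).getD "") ",").getD []).map
    PySem.Str.strip
  match identifier.toList with
  | [] => nodes   -- Python raises IndexError on identifier[0]; excluded by Pre_
  | c :: cs =>
    let node_type := if !(PySem.Chars.isalpha c) then String.ofList [c] else ""
    let identifier := if !(PySem.Chars.isalpha c) then String.ofList cs else identifier
    nodes.insert identifier (node_type, [], outputs)

-- pass 2 of A, innermost: create the placeholder if needed, then nodes[c][1].append(i)
def pvStepA2c (i : String) (nodes : PySem.Dict String (String × List String × List String))
    (c : String) : PySem.Dict String (String × List String × List String) :=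
  let nodes := if !(nodes.contains c) then nodes.insert c ("out", [], []) else nodes
  nodes.modify c ("", [], []) (fun v => (v.1, v.2.1 ++ [i], v.2.2))

-- pass 2 of A, per key i: walk nodes[i][2]
def pvStepA2 (nodes : PySem.Dict String (String × List String × List String))
    (i : String) : PySem.Dict String (String × List String × List String) :=
  (nodes.getD i ("", [], [])).2.2.foldl (pvStepA2c i) nodes

def parse_schematic (string : String) : List (String × String × List String × List String) :=
  let lines := pvLines string
  let nodes := lines.foldl pvStepA1 PySem.Dict.empty
  let nodes := nodes.keys.foldl pvStepA2 nodes
  nodes.items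

-- ===== PORT B =====
-- Source B's declarations loop body: parse the line inline, branch on the first character
def pvStepB1 (d : PySem.Dict String (String × List String)) (line : String) :
    PySem.Dict String (String × List String) :=
  let parts := ((PySem.Str.split? line "->").getD []).map PySem.Str.strip
  let outputs := ((PySem.Str.split? ((PySem.List.pyGet? parts 1).getD "") ",").getD []).map
    PySem.Str.strip
  let ident := parts.headD ""
  match ident.toList with
  | [] => d   -- Python raises IndexError on ident[0]; excluded by Pre_
  | c :: cs =>
    if PySem.Chars.isalpha c then d.insert ident ("", outputs)
    else d.insert (String.ofList cs) (String.ofList [c], outputs)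

-- Source B's inputs_of: who feeds t — scan the declarations, one entry per matching output
def pvInputsOf (decls : PySem.Dict String (String × List String)) (t : String) :
    List String :=
  decls.items.flatMap (fun p => (p.2.2.filter (fun c => c == t)).map (fun _ => p.1))

def parse_schematic_alt (string : String) : List (String × String × List String × List String) :=
  let lines := pvLines string
  let decls := lines.foldl pvStepB1 PySem.Dict.empty
  -- the dict comprehension over decls.items()
  let result := decls.items.foldl
    (fun r p => r.insert p.1 (p.2.1, pvInputsOf decls p.1, p.2.2)) PySem.Dict.empty
  -- undeclared targets become "out" placeholder nodes, inputs again by direct scan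
  let result := decls.items.foldl
    (fun r p => p.2.2.foldl
      (fun r c => if !(r.contains c) then r.insert c ("out", pvInputsOf decls c, []) else r) r)
    result
  result.items

-- ===== PRECONDITION & SPEC =====
-- Pre_ excludes exactly the inputs on which Python A raises IndexError: a non-empty
-- line without "->", or whose part before the first "->" strips to the empty string
-- (then identifier[0] does not exist).  B raises there too.
def pvLineOK (line : String) : Bool :=
  let parts := (PySem.Str.split? line "->").getD []
  decide (2 ≤ parts.length) && (PySem.Str.strip (parts.headD "") != "")

def Pre_parse_schematic (string : String) : Prop :=
  ∀ line ∈ pvLines string, pvLineOK line = true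
instance (string : String) : Decidable (Pre_parse_schematic string) := by
  unfold Pre_parse_schematic; infer_instance

def pvWitness_parse_schematic : String := "broadcaster -> a, b\n%a -> b\n&b -> output"

def Spec_parse_schematic (string : String) (out : List (String × String × List String × List String)) : Prop := out = parse_schematic_alt string
instance (string : String) (out : List (String × String × List String × List String)) : Decidable (Spec_parse_schematic string out) := by unfold Spec_parse_schematic; infer_instance

-- ===== CLAIM (what is proved, stated in full; the proofs are below) =====
def Claim_equal_parse_schematic : Prop := ∀ (string : String), Dom_parse_schematic string → Pre_parse_schematic string → Spec_parse_schematic string (parse_schematic string)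

-- ===== LEMMAS AND PROOFS =====

-- value-expansion of the declarations table: what A's pass 1 stores
def pvExpand (D : PySem.Dict String (String × List String)) :
    PySem.Dict String (String × List String × List String) :=
  PySem.Dict.mk (D.items.map (fun p => (p.1, (p.2.1, ([] : List String), p.2.2))))

-- A's reverse-edge index, built from the declarations table
def pvInputs (D : PySem.Dict String (String × List String)) :
    PySem.Dict String (List String) :=
  D.items.foldl
    (fun inp p => p.2.2.foldl (fun inp c => inp.modify c [] (fun l => l ++ [p.1])) inp)
    PySem.Dict.empty

-- the state of A's pass 2 as a function of the declarations table and the inputs index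
def pvF (D : PySem.Dict String (String × List String))
    (inp : PySem.Dict String (List String)) :
    PySem.Dict String (String × List String × List String) :=
  PySem.Dict.mk
    (D.items.map (fun p => (p.1, (p.2.1, inp.getD p.1 [], p.2.2)))
      ++ (inp.items.filter (fun q => !(D.contains q.1))).map (fun q => (q.1, ("out", q.2, []))))

-- "same dict observably": same key sequence, same lookups
abbrev pvEq (a b : PySem.Dict String (String × List String × List String)) : Prop :=
  a.keys = b.keys ∧ ∀ k, a.get? k = b.get? k

theorem pvExpand_contains (D : PySem.Dict String (String × List String)) (k : String) :
    (pvExpand D).contains k = D.contains k := by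
  simp [pvExpand, PySem.Dict.contains, Function.comp_def]

theorem pvExpand_insert (D : PySem.Dict String (String × List String)) (k : String)
    (t : String) (o : List String) :
    (pvExpand D).insert k (t, [], o) = pvExpand (D.insert k (t, o)) := by
  by_cases h : D.contains k = true
  · have h2 : (pvExpand D).contains k = true := by rw [pvExpand_contains]; exact h
    apply PySem.Dict.ext
    rw [PySem.Dict.items_insert_of_contains _ _ h2]
    simp only [pvExpand, PySem.Dict.items_insert_of_contains _ _ h, List.map_map]
    apply List.map_congr_left
    intro p _
    by_cases hp : p.1 = k <;> simp [hp]
  · have h' : D.contains k = false := by simpa using h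
    have h2 : (pvExpand D).contains k = false := by rw [pvExpand_contains]; exact h'
    apply PySem.Dict.ext
    rw [PySem.Dict.items_insert_of_not_contains _ _ h2]
    simp only [pvExpand, PySem.Dict.items_insert_of_not_contains _ _ h', List.map_append]
    simp

theorem pvF_empty (D : PySem.Dict String (String × List String)) :
    pvF D PySem.Dict.empty = pvExpand D := by
  apply PySem.Dict.ext
  simp only [pvF, pvExpand, PySem.Dict.empty, List.filter_nil, List.map_nil, List.append_nil]
  apply List.map_congr_left
  intro p _
  rw [PySem.Dict.getD_eq_get?_getD]
  rfl

theorem pvF_keys (D : PySem.Dict String (String × List String))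
    (inp : PySem.Dict String (List String)) :
    (pvF D inp).keys
      = D.keys ++ ((inp.items.filter (fun q => !(D.contains q.1))).map (fun q => q.1)) := by
  simp [pvF, PySem.Dict.keys, Function.comp_def]

theorem pvF_contains (D : PySem.Dict String (String × List String))
    (inp : PySem.Dict String (List String)) (k : String) :
    (pvF D inp).contains k = (D.contains k || inp.contains k) := by
  cases hD : D.contains k with
  | true =>
    have h : (pvF D inp).contains k = true := by
      rw [PySem.Dict.contains_iff_mem_keys, pvF_keys]
      exact List.mem_append_left _ ((PySem.Dict.contains_iff_mem_keys D k).mp hD)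
    simp [h]
  | false =>
    cases hI : inp.contains k with
    | false =>
      have h : ¬ (pvF D inp).contains k = true := by
        rw [PySem.Dict.contains_iff_mem_keys, pvF_keys]
        intro hmem
        rcases List.mem_append.mp hmem with h1 | h2
        · have := (PySem.Dict.contains_iff_mem_keys D k).mpr h1
          simp [hD] at this
        · rcases List.mem_map.mp h2 with ⟨q, hq, rfl⟩
          have hqm := (List.mem_filter.mp hq).1
          have : inp.contains q.1 = true := by
            rw [PySem.Dict.contains_iff_mem_keys]
            exact List.mem_map_of_mem hqm
          simp [hI] at this
      simp only [Bool.not_eq_true] at h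
      simp [h]
    | true =>
      have h : (pvF D inp).contains k = true := by
        rw [PySem.Dict.contains_iff_mem_keys, pvF_keys]
        refine List.mem_append_right _ ?_
        have hk := (PySem.Dict.contains_iff_mem_keys inp k).mp hI
        rcases List.mem_map.mp hk with ⟨q, hq, rfl⟩
        exact List.mem_map.mpr ⟨q, List.mem_filter.mpr ⟨hq, by simp [hD]⟩, rfl⟩
      simp [h]

theorem pvF_nodup_keys (D : PySem.Dict String (String × List String))
    (inp : PySem.Dict String (List String)) (hD : D.keys.Nodup) (hI : inp.keys.Nodup) :
    (pvF D inp).keys.Nodup := by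
  rw [pvF_keys]
  refine List.Nodup.append hD ?_ ?_
  · exact List.Nodup.sublist (List.Sublist.map _ (List.filter_sublist)) hI
  · intro x hx hx2
    rcases List.mem_map.mp hx2 with ⟨q, hq, rfl⟩
    have hnc := (List.mem_filter.mp hq).2
    simp only [Bool.not_eq_true'] at hnc
    have := (PySem.Dict.contains_iff_mem_keys D q.1).mpr hx
    simp [hnc] at this

theorem pvF_get?_decl (D : PySem.Dict String (String × List String))
    (inp : PySem.Dict String (List String)) (k : String) (v : String × List String)
    (h : D.get? k = some v) :
    (pvF D inp).get? k = some (v.1, inp.getD k [], v.2) := by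
  simp only [PySem.Dict.get?] at h ⊢
  simp only [pvF, List.find?_append, List.find?_map, Function.comp_def]
  cases hf : List.find? (fun p => p.1 == k) D.items with
  | none => rw [hf] at h; simp at h
  | some p =>
    have hpk : p.1 = k := by
      have := List.find?_some hf
      simpa using this
    rw [hf] at h
    simp only [Option.map_some, Option.some.injEq] at h
    simp [hpk, h]

theorem pv_find?_filter {α : Type} (l : List α) (pp qq : α → Bool)
    (himp : ∀ a, qq a = true → pp a = true) :
    (l.filter pp).find? qq = l.find? qq := by
  induction l with
  | nil => rfl
  | cons a t ih =>
    by_cases hq : qq a = true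
    · have hp := himp a hq
      simp [List.filter_cons, hp, hq]
    · by_cases hp : pp a = true <;> simp [List.filter_cons, hp, hq, ih]

theorem pvF_get?_undecl (D : PySem.Dict String (String × List String))
    (inp : PySem.Dict String (List String)) (k : String) (h : D.contains k = false) :
    (pvF D inp).get? k = (inp.get? k).map (fun ins => (("out" : String), ins, ([] : List String))) := by
  simp only [pvF, PySem.Dict.get?, List.find?_append, List.find?_map, Function.comp_def]
  have hnone : List.find? (fun p : String × String × List String => p.1 == k) D.items = none := by
    rw [List.find?_eq_none]
    intro p hp hbeq
    have hm : D.contains k = true := by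
      have : p.1 = k := by simpa using hbeq
      unfold PySem.Dict.contains
      exact List.any_eq_true.mpr ⟨p, hp, by simp [this]⟩
    simp [h] at hm
  rw [hnone]
  rw [pv_find?_filter]
  · cases hf : List.find? (fun q : String × List String => q.1 == k) inp.items <;> rfl
  · intro q hq
    have : q.1 = k := by simpa using hq
    simp [this, h]

-- the non-declared ("placeholder") key sequence of pvF
theorem pv_fk_insert_old (D : PySem.Dict String (String × List String))
    (inp : PySem.Dict String (List String)) (c : String) (w : List String)
    (h : inp.contains c = true ∨ D.contains c = true) :
    (((inp.insert c w).items.filter (fun q => !(D.contains q.1))).map (fun q => q.1))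
      = ((inp.items.filter (fun q => !(D.contains q.1))).map (fun q => q.1)) := by
  by_cases hc : inp.contains c = true
  · rw [PySem.Dict.items_insert_of_contains _ _ hc, List.filter_map, List.map_map]
    have hpred : ((fun q : String × List String => !(D.contains q.1)) ∘
        (fun p : String × List String => if (p.1 == c) = true then (c, w) else p))
        = (fun q : String × List String => !(D.contains q.1)) := by
      funext q
      by_cases hqc : (q.1 == c) = true
      · have : q.1 = c := by simpa using hqc
        simp [hqc, this]
      · have hne : q.1 ≠ c := by simpa using hqc
        simp [hqc, hne]
    rw [hpred]
    apply List.map_congr_left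
    intro q hq
    by_cases hqc : (q.1 == c) = true
    · have : q.1 = c := by simpa using hqc
      simp [hqc, this]
    · have hne : q.1 ≠ c := by simpa using hqc
      simp [hqc, hne]
  · have hDc : D.contains c = true := h.resolve_left hc
    rw [PySem.Dict.items_insert_of_not_contains _ _ (by simpa using hc)]
    rw [List.filter_append]
    simp [hDc]

theorem pv_fk_insert_new (D : PySem.Dict String (String × List String))
    (inp : PySem.Dict String (List String)) (c : String) (w : List String)
    (h1 : inp.contains c = false) (h2 : D.contains c = false) :
    (((inp.insert c w).items.filter (fun q => !(D.contains q.1))).map (fun q => q.1))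
      = ((inp.items.filter (fun q => !(D.contains q.1))).map (fun q => q.1)) ++ [c] := by
  rw [PySem.Dict.items_insert_of_not_contains _ _ h1, List.filter_append]
  simp [h2]

theorem pv_nodup_modify (inp : PySem.Dict String (List String)) (c : String)
    (f : List String → List String) (hI : inp.keys.Nodup) :
    (inp.modify c [] f).keys.Nodup := by
  rw [PySem.Dict.keys_modify]
  by_cases hc : inp.contains c = true
  · rw [PySem.Dict.keys_insert_of_contains _ _ hc]; exact hI
  · rw [PySem.Dict.keys_insert_of_not_contains _ _ (by simpa using hc)]
    refine List.Nodup.append hI (List.nodup_singleton _) ?_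
    intro x hx hx2
    have hxc : x = c := by simpa using hx2
    subst hxc
    have := (PySem.Dict.contains_iff_mem_keys inp x).mpr hx
    simp [this] at hc

-- the key step: A's placeholder-create-and-append on a pvF state is an
-- inputs-index update, observably
theorem pvStep2c_eq (D : PySem.Dict String (String × List String))
    (inp : PySem.Dict String (List String)) (i c : String)
    (nodes : PySem.Dict String (String × List String × List String))
    (hn : pvEq nodes (pvF D inp)) :
    pvEq (pvStepA2c i nodes c) (pvF D (inp.modify c [] (fun l => l ++ [i]))) := by
  obtain ⟨hk, hg⟩ := hn
  have hcont : ∀ j, nodes.contains j = (D.contains j || inp.contains j) := by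
    intro j
    rw [PySem.Dict.contains_eq_decide_mem_keys, hk, ← PySem.Dict.contains_eq_decide_mem_keys,
      pvF_contains]
  have hinp' : inp.modify c [] (fun l => l ++ [i]) = inp.insert c (inp.getD c [] ++ [i]) := rfl
  rw [hinp']
  by_cases hc : nodes.contains c = true
  · -- the target already has a node: no placeholder is created
    have hor : inp.contains c = true ∨ D.contains c = true := by
      have hx := (hcont c).symm.trans hc
      simp only [Bool.or_eq_true] at hx
      tauto
    have hn' : (if (!nodes.contains c) = true then nodes.insert c ("out", [], []) else nodes)
        = nodes := by rw [hc]; simp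
    constructor
    · simp only [pvStepA2c, PySem.Dict.modify]
      rw [hn', PySem.Dict.keys_insert_of_contains _ _ hc, hk,
        pvF_keys, pvF_keys, pv_fk_insert_old _ _ _ _ hor]
    · intro j
      simp only [pvStepA2c, PySem.Dict.modify]
      rw [hn', PySem.Dict.get?_insert]
      by_cases hj : j = c
      · subst hj
        simp only [if_pos rfl]
        cases hDc : D.get? j with
        | some w =>
          have hv : nodes.getD j ("", [], []) = (w.1, inp.getD j [], w.2) := by
            rw [PySem.Dict.getD_eq_get?_getD, hg, pvF_get?_decl _ _ _ _ hDc]; rfl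
          rw [hv, pvF_get?_decl _ _ _ _ hDc, PySem.Dict.getD_insert]
          simp
        | none =>
          have hDcf : D.contains j = false := by
            rw [← PySem.Dict.get?_eq_none_iff_contains]; exact hDc
          have hIc : inp.contains j = true := by
            have hx := (hcont j).symm.trans hc
            rw [hDcf] at hx; simpa using hx
          obtain ⟨ins, hins⟩ : ∃ ins, inp.get? j = some ins := by
            cases hq : inp.get? j with
            | none =>
              rw [PySem.Dict.get?_eq_none_iff_contains] at hq
              rw [hq] at hIc; exact absurd hIc (by simp)
            | some x => exact ⟨x, rfl⟩
          have hv : nodes.getD j ("", [], []) = ("out", ins, []) := by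
            rw [PySem.Dict.getD_eq_get?_getD, hg, pvF_get?_undecl _ _ _ hDcf, hins]; rfl
          rw [hv, pvF_get?_undecl _ _ _ hDcf, PySem.Dict.get?_insert]
          simp [PySem.Dict.getD_eq_get?_getD, hins]
      · simp only [if_neg hj]
        rw [hg]
        cases hDj : D.get? j with
        | some w =>
          rw [pvF_get?_decl _ _ _ _ hDj, pvF_get?_decl _ _ _ _ hDj, PySem.Dict.getD_insert]
          simp [hj]
        | none =>
          have hDjf : D.contains j = false := by
            rw [← PySem.Dict.get?_eq_none_iff_contains]; exact hDj
          rw [pvF_get?_undecl _ _ _ hDjf, pvF_get?_undecl _ _ _ hDjf, PySem.Dict.get?_insert]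
          simp [hj]
  · -- fresh target: A inserts the "out" placeholder, the index starts a fresh entry
    have hcf : nodes.contains c = false := by simpa using hc
    have hboth := (hcont c).symm.trans hcf
    have hDc : D.contains c = false := by
      cases hD2 : D.contains c
      · rfl
      · rw [hD2] at hboth; simp at hboth
    have hIc : inp.contains c = false := by
      cases hI2 : inp.contains c
      · rfl
      · rw [hI2] at hboth; simp at hboth
    have hn' : (if (!nodes.contains c) = true then nodes.insert c ("out", [], []) else nodes)
        = nodes.insert c ("out", [], []) := by rw [hcf]; simp
    constructor
    · simp only [pvStepA2c, PySem.Dict.modify]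
      rw [hn', PySem.Dict.keys_insert_of_contains _ _ (PySem.Dict.contains_insert_self nodes c _),
        PySem.Dict.keys_insert_of_not_contains _ _ hcf, hk, pvF_keys, pvF_keys,
        pv_fk_insert_new _ _ _ _ hIc hDc, List.append_assoc]
    · intro j
      simp only [pvStepA2c, PySem.Dict.modify]
      rw [hn', PySem.Dict.get?_insert]
      by_cases hj : j = c
      · subst hj
        simp only [if_pos rfl]
        rw [pvF_get?_undecl _ _ _ hDc, PySem.Dict.get?_insert]
        simp [PySem.Dict.getD_eq_get?_getD,
          (PySem.Dict.get?_eq_none_iff_contains inp j).mpr hIc]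
      · simp only [if_neg hj]
        rw [PySem.Dict.get?_insert]
        simp only [if_neg hj]
        rw [hg]
        cases hDj : D.get? j with
        | some w =>
          rw [pvF_get?_decl _ _ _ _ hDj, pvF_get?_decl _ _ _ _ hDj, PySem.Dict.getD_insert]
          simp [hj]
        | none =>
          have hDjf : D.contains j = false := by
            rw [← PySem.Dict.get?_eq_none_iff_contains]; exact hDj
          rw [pvF_get?_undecl _ _ _ hDjf, pvF_get?_undecl _ _ _ hDjf, PySem.Dict.get?_insert]
          simp [hj]

theorem pvInner_eq (D : PySem.Dict String (String × List String)) (i : String) :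
    ∀ (os : List String) (inp : PySem.Dict String (List String))
      (nodes : PySem.Dict String (String × List String × List String)),
      inp.keys.Nodup → pvEq nodes (pvF D inp) →
      pvEq (os.foldl (pvStepA2c i) nodes)
        (pvF D (os.foldl (fun inp c => inp.modify c [] (fun l => l ++ [i])) inp)) := by
  intro os
  induction os with
  | nil => intro inp nodes _ h; simpa using h
  | cons c t ih =>
    intro inp nodes hI h
    simp only [List.foldl_cons]
    exact ih _ _ (pv_nodup_modify _ _ _ hI) (pvStep2c_eq _ _ i c _ h)

theorem pv_foldl_modify_nodup (i : String) :
    ∀ (os : List String) (inp : PySem.Dict String (List String)), inp.keys.Nodup →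
      (os.foldl (fun inp c => inp.modify c [] (fun l => l ++ [i])) inp).keys.Nodup := by
  intro os
  induction os with
  | nil => intro inp h; simpa using h
  | cons c t ih =>
    intro inp hI
    simp only [List.foldl_cons]
    exact ih _ (pv_nodup_modify _ _ _ hI)

theorem pvOuter_eq (D : PySem.Dict String (String × List String)) :
    ∀ (l : List (String × String × List String)) (inp : PySem.Dict String (List String))
      (nodes : PySem.Dict String (String × List String × List String)),
      (∀ p ∈ l, D.get? p.1 = some p.2) → inp.keys.Nodup → pvEq nodes (pvF D inp) →
      pvEq (l.foldl (fun nodes p => pvStepA2 nodes p.1) nodes)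
        (pvF D (l.foldl
          (fun inp p => p.2.2.foldl (fun inp c => inp.modify c [] (fun l => l ++ [p.1])) inp)
          inp)) := by
  intro l
  induction l with
  | nil => intro inp nodes _ _ h; simpa using h
  | cons p t ih =>
    intro inp nodes hmem hI h
    simp only [List.foldl_cons]
    have hp := hmem p (List.mem_cons_self)
    have houts : (nodes.getD p.1 ("", [], [])).2.2 = p.2.2 := by
      rw [PySem.Dict.getD_eq_get?_getD, h.2, pvF_get?_decl _ _ _ _ hp]
      rfl
    have hstep : pvStepA2 nodes p.1 = (p.2.2).foldl (pvStepA2c p.1) nodes := by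
      unfold pvStepA2; rw [houts]
    rw [hstep]
    exact ih _ _ (fun q hq => hmem q (List.mem_cons_of_mem _ hq))
      (pv_foldl_modify_nodup p.1 p.2.2 inp hI)
      (pvInner_eq D p.1 p.2.2 inp nodes hI h)

theorem pv_foldl_modify_nodup_outer :
    ∀ (l : List (String × String × List String)) (inp : PySem.Dict String (List String)),
      inp.keys.Nodup →
      (l.foldl
        (fun inp p => p.2.2.foldl (fun inp c => inp.modify c [] (fun l => l ++ [p.1])) inp)
        inp).keys.Nodup := by
  intro l
  induction l with
  | nil => intro inp h; simpa using h
  | cons p t ih =>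
    intro inp hI
    simp only [List.foldl_cons]
    exact ih _ (pv_foldl_modify_nodup p.1 p.2.2 inp hI)

-- pass 1 of A stores exactly the value-expanded declarations table of B
theorem pvStepA1_eq (D : PySem.Dict String (String × List String)) (line : String)
    (hok : pvLineOK line = true) :
    pvStepA1 (pvExpand D) line = pvExpand (pvStepB1 D line) := by
  simp only [pvLineOK, Bool.and_eq_true, decide_eq_true_eq, bne_iff_ne, ne_eq] at hok
  obtain ⟨hlen, hne⟩ := hok
  have hne0 : (PySem.Str.split? line "->").getD [] ≠ [] := by
    intro hx; rw [hx] at hlen; simp at hlen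
  have hhead : (((PySem.Str.split? line "->").getD []).map PySem.Str.strip).headD ""
      = PySem.Str.strip (((PySem.Str.split? line "->").getD []).headD "") := by
    cases hx : (PySem.Str.split? line "->").getD [] with
    | nil => exact absurd hx hne0
    | cons a t => simp
  simp only [pvStepA1, pvStepB1]
  cases htl : ((((PySem.Str.split? line "->").getD []).map PySem.Str.strip).headD "").toList with
  | nil =>
    exfalso
    apply hne
    rw [← hhead]
    rw [← String.ofList_toList
      (s := (((PySem.Str.split? line "->").getD []).map PySem.Str.strip).headD ""), htl]
  | cons c cs =>
    by_cases ha : PySem.Chars.isalpha c = true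
    · simp only [ha, Bool.not_true, Bool.false_eq_true, if_false, if_true]
      exact pvExpand_insert _ _ _ _
    · have ha' : PySem.Chars.isalpha c = false := by simpa using ha
      simp only [ha', Bool.not_false, if_true, Bool.false_eq_true, if_false]
      exact pvExpand_insert _ _ _ _

theorem pvPass1 :
    ∀ (lines : List String) (D : PySem.Dict String (String × List String)),
      (∀ l ∈ lines, pvLineOK l = true) →
      lines.foldl pvStepA1 (pvExpand D) = pvExpand (lines.foldl pvStepB1 D) := by
  intro lines
  induction lines with
  | nil => intro D _; rfl
  | cons l t ih =>
    intro D hok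
    simp only [List.foldl_cons]
    rw [pvStepA1_eq _ _ (hok l (List.mem_cons_self)), ih _ (fun x hx => hok x (List.mem_cons_of_mem _ hx))]

-- pvStepB1 keeps the declaration keys unique
theorem pv_nodup_stepB1 (d : PySem.Dict String (String × List String)) (line : String)
    (h : d.keys.Nodup) : (pvStepB1 d line).keys.Nodup := by
  simp only [pvStepB1]
  cases ((((PySem.Str.split? line "->").getD []).map PySem.Str.strip).headD "").toList with
  | nil => exact h
  | cons c cs =>
    by_cases ha : PySem.Chars.isalpha c = true
    · simp only [ha, if_true]; exact PySem.Dict.nodup_keys_insert _ _ _ h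
    · simp only [ha, Bool.false_eq_true, if_false]; exact PySem.Dict.nodup_keys_insert _ _ _ h

theorem pv_nodup_declsB :
    ∀ (lines : List String) (d : PySem.Dict String (String × List String)), d.keys.Nodup →
      (lines.foldl pvStepB1 d).keys.Nodup := by
  intro lines
  induction lines with
  | nil => intro d h; exact h
  | cons l t ih => intro d h; exact ih _ (pv_nodup_stepB1 d l h)

-- the reverse index's lookup IS B's direct scan
theorem pvInner_getD (i t : String) :
    ∀ (os : List String) (inp : PySem.Dict String (List String)),
      (os.foldl (fun inp c => inp.modify c [] (fun l => l ++ [i])) inp).getD t []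
        = inp.getD t [] ++ (os.filter (fun c => c == t)).map (fun _ => i) := by
  intro os inp
  have h : os.foldl (fun inp c => inp.modify c [] (fun l => l ++ [i])) inp
      = (os.map (fun c => (c, i))).foldl (fun d p => d.modify p.1 [] (fun l => l ++ [p.2])) inp := by
    rw [List.foldl_map]
  rw [h, PySem.Dict.getD_foldl_modify_append, List.filter_map, List.map_map]
  simp [Function.comp_def]

theorem pvInputs_getD (t : String) :
    ∀ (l : List (String × String × List String)) (inp : PySem.Dict String (List String)),
      (l.foldl
        (fun inp p => p.2.2.foldl (fun inp c => inp.modify c [] (fun l => l ++ [p.1])) inp)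
        inp).getD t []
      = inp.getD t [] ++ l.flatMap (fun p => (p.2.2.filter (fun c => c == t)).map (fun _ => p.1)) := by
  intro l
  induction l with
  | nil => intro inp; simp
  | cons p tl ih =>
    intro inp
    simp only [List.foldl_cons, List.flatMap_cons]
    rw [ih, pvInner_getD, List.append_assoc]

theorem pvInputsOf_eq_getD (D : PySem.Dict String (String × List String)) (t : String) :
    (pvInputs D).getD t [] = pvInputsOf D t := by
  rw [pvInputs, pvInputs_getD]
  simp [pvInputsOf]

-- keys of the reverse index: the distinct output targets, in first-appearance order
theorem pvInputs_keys :
    ∀ (l : List (String × String × List String)) (inp : PySem.Dict String (List String)),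
      (l.foldl
        (fun inp p => p.2.2.foldl (fun inp c => inp.modify c [] (fun l => l ++ [p.1])) inp)
        inp).keys
      = PySem.Set.update inp.keys (l.flatMap (fun p => p.2.2)) := by
  intro l
  induction l with
  | nil => intro inp; simp
  | cons p tl ih =>
    intro inp
    simp only [List.foldl_cons, List.flatMap_cons]
    rw [ih, PySem.Dict.keys_foldl_modify, PySem.Set.update_append]

theorem pvInputs_keys_ofList (D : PySem.Dict String (String × List String)) :
    (pvInputs D).keys = PySem.Set.ofList (D.items.flatMap (fun p => p.2.2)) := by
  rw [pvInputs, pvInputs_keys]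
  rw [PySem.Dict.keys_empty, PySem.Set.update_nil_left]

-- flattening a nested fold whose inner body ignores the outer element
theorem pvFoldFlat {σ : Type} (g : σ → String → σ) :
    ∀ (l : List (String × String × List String)) (s : σ),
      l.foldl (fun s p => p.2.2.foldl g s) s = (l.flatMap (fun p => p.2.2)).foldl g s := by
  intro l
  induction l with
  | nil => intro s; rfl
  | cons p tl ih =>
    intro s
    simp only [List.foldl_cons, List.flatMap_cons, List.foldl_append]
    exact ih _

-- B's conditional-insert loop appends exactly the fresh distinct targets
theorem pvCondInsert (v : String → String × List String × List String) :
    ∀ (ts : List String) (r : PySem.Dict String (String × List String × List String)),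
      (ts.foldl (fun r c => if (!(r.contains c)) = true then r.insert c (v c) else r) r).items
        = r.items ++ ((PySem.Set.ofList ts).filter (fun c => !(r.contains c))).map
            (fun c => (c, v c)) := by
  intro ts
  induction ts with
  | nil => intro r; simp [PySem.Set.ofList]
  | cons c tl ih =>
    intro r
    rw [PySem.Set.ofList_cons]
    by_cases hc : r.contains c = true
    · simp only [List.foldl_cons, hc, Bool.not_true, Bool.false_eq_true, if_false]
      rw [ih]
      congr 1
      congr 1
      rw [List.filter_cons_of_neg (by simp [hc]), PySem.Set.discard, List.filter_filter]
      apply List.filter_congr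
      intro x _
      by_cases hx : x = c
      · simp [hx, hc]
      · simp [hx]
    · have hcf : r.contains c = false := by simpa using hc
      simp only [List.foldl_cons, hcf, Bool.not_false, if_true]
      rw [ih]
      rw [PySem.Dict.items_insert_of_not_contains _ _ hcf, List.append_assoc]
      congr 1
      rw [List.filter_cons_of_pos (by simp [hcf]), List.map_cons]
      simp only [List.singleton_append]
      rw [PySem.Set.discard, List.filter_filter]
      refine congrArg _ (congrArg (List.map (fun c => (c, v c))) ?_)
      apply List.filter_congr
      intro x _
      rw [PySem.Dict.contains_insert]
      by_cases hx : x = c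
      · simp [hx]
      · simp [Bool.and_comm]

-- B's assembled items are exactly pvF of the declarations table and the reverse index
theorem pvAssembleB (D : PySem.Dict String (String × List String)) (hDnd : D.keys.Nodup) :
    (D.items.foldl
      (fun r p => p.2.2.foldl
        (fun r c => if (!(r.contains c)) = true then r.insert c ("out", pvInputsOf D c, []) else r) r)
      (D.items.foldl
        (fun r p => r.insert p.1 (p.2.1, pvInputsOf D p.1, p.2.2)) PySem.Dict.empty)).items
    = (pvF D (pvInputs D)).items := by
  have hInd : (pvInputs D).keys.Nodup := by
    rw [pvInputs]
    exact pv_foldl_modify_nodup_outer D.items PySem.Dict.empty PySem.Dict.nodup_keys_empty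
  -- the comprehension part
  have hB1 : (D.items.foldl
      (fun r p => r.insert p.1 (p.2.1, pvInputsOf D p.1, p.2.2)) PySem.Dict.empty).items
      = D.items.map (fun p => (p.1, (p.2.1, pvInputsOf D p.1, p.2.2))) := by
    have h := PySem.Dict.items_foldl_insert_fresh D.items (fun p => p.1)
      (fun p => (p.2.1, pvInputsOf D p.1, p.2.2)) PySem.Dict.empty
      (fun a _ => PySem.Dict.contains_empty _) hDnd
    simpa using h
  have hkeys1 : (D.items.foldl
      (fun r p => r.insert p.1 (p.2.1, pvInputsOf D p.1, p.2.2)) PySem.Dict.empty).keys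
      = D.keys := by
    simp only [PySem.Dict.keys, hB1]
    simp [Function.comp_def]
  have hpred : (fun c => !((D.items.foldl
      (fun r p => r.insert p.1 (p.2.1, pvInputsOf D p.1, p.2.2)) PySem.Dict.empty).contains c))
      = (fun c => !(D.contains c)) := by
    funext c
    rw [PySem.Dict.contains_eq_decide_mem_keys, hkeys1, ← PySem.Dict.contains_eq_decide_mem_keys]
  -- flatten the placeholder loop and apply the conditional-insert lemma
  rw [pvFoldFlat, pvCondInsert, hpred, hB1]
  -- pvF's placeholder part, via the keys of the reverse index
  have hA2 : (pvInputs D).items.filter (fun q => !(D.contains q.1))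
      = ((pvInputs D).keys.filter (fun c => !(D.contains c))).map
          (fun c => (c, (pvInputs D).getD c [])) := by
    rw [PySem.Dict.items_eq_map_keys (pvInputs D) hInd ([] : List String), List.filter_map]
    simp [Function.comp_def]
  simp only [pvF]
  congr 1
  · apply List.map_congr_left
    intro p _
    rw [pvInputsOf_eq_getD]
  · rw [hA2, List.map_map, pvInputs_keys_ofList]
    apply List.map_congr_left
    intro c hc
    simp only [Function.comp_def]
    rw [pvInputsOf_eq_getD]

-- A's two passes, as items of pvF of the declarations table and the reverse index
theorem pvAssembleA (D : PySem.Dict String (String × List String)) (hDnd : D.keys.Nodup) :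
    ((pvExpand D).keys.foldl pvStepA2 (pvExpand D)).items = (pvF D (pvInputs D)).items := by
  have hInd : (pvInputs D).keys.Nodup := by
    rw [pvInputs]
    exact pv_foldl_modify_nodup_outer D.items PySem.Dict.empty PySem.Dict.nodup_keys_empty
  have hkeysE : (pvExpand D).keys = D.items.map (fun p => p.1) := by
    simp [pvExpand, PySem.Dict.keys, Function.comp_def]
  have hmem : ∀ p ∈ D.items, D.get? p.1 = some p.2 := by
    intro p hp
    exact PySem.Dict.get?_of_mem_items D (by simpa using hp) hDnd
  have hstart : pvEq (pvExpand D) (pvF D PySem.Dict.empty) := by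
    rw [pvF_empty]; exact ⟨rfl, fun _ => rfl⟩
  have hmain : pvEq ((pvExpand D).keys.foldl pvStepA2 (pvExpand D)) (pvF D (pvInputs D)) := by
    rw [hkeysE, List.foldl_map]
    exact pvOuter_eq D D.items PySem.Dict.empty (pvExpand D) hmem
      PySem.Dict.nodup_keys_empty hstart
  have hndA : ((pvExpand D).keys.foldl pvStepA2 (pvExpand D)).keys.Nodup := by
    rw [hmain.1]
    exact pvF_nodup_keys _ _ hDnd hInd
  rw [PySem.Dict.items_eq_map_keys _ hndA ("", [], []),
    PySem.Dict.items_eq_map_keys _ (pvF_nodup_keys _ _ hDnd hInd) ("", [], []), hmain.1]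
  apply List.map_congr_left
  intro k _
  rw [PySem.Dict.getD_eq_get?_getD, PySem.Dict.getD_eq_get?_getD, hmain.2]

-- ===== VERDICT (by name: the statement is the Claim_ definition above) =====
theorem parse_schematic_spec : Claim_equal_parse_schematic := by
  intro string _ hpre
  unfold Spec_parse_schematic
  simp only [parse_schematic, parse_schematic_alt]
  have h1 : (pvLines string).foldl pvStepA1 PySem.Dict.empty
      = pvExpand ((pvLines string).foldl pvStepB1 PySem.Dict.empty) :=
    pvPass1 (pvLines string) PySem.Dict.empty hpre
  have hDnd : ((pvLines string).foldl pvStepB1 PySem.Dict.empty).keys.Nodup :=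
    pv_nodup_declsB (pvLines string) PySem.Dict.empty PySem.Dict.nodup_keys_empty
  rw [h1, pvAssembleA _ hDnd, ← pvAssembleB _ hDnd]
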